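-- pv_equiv track=rewrite | github.com/opnfv/calipso | base/utils/cli_access.py | merge_ws_spillover_lines
-- ===== SOURCE A (Python) =====
-- def merge_ws_spillover_lines(lines):
--     # with WS-separated output, extra output sometimes spills to next line
--     # detect that and add to the end of the previous line for our procesing
--     pending_line = None
--     fixed_lines = []
--     # remove headers line
--     for l in lines:
--         if l[0] == '\t':
--             # this is a spill-over line
--             if pending_line:
--                 # add this line to the end of the previous line
--                 pending_line = pending_line.strip() + "," + l.strip()
--         else:
--             # add the previous pending line to the fixed lines list
--             if pending_line:
--                 fixed_lines.append(pending_line)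
--             # make current line the pending line
--             pending_line = l
--     if pending_line:
--         fixed_lines.append(pending_line)
--     return fixed_lines
-- ===== SOURCE B (Python) =====
-- def merge_ws_spillover_lines(lines):
--     # Two-phase: first group each primary line with its tab-prefixed spillover
--     # lines, then render each group (join-based instead of repeated stripping).
--     groups = []
--     for l in lines:
--         if l.startswith('\t'):
--             if groups:
--                 groups[-1][1].append(l)
--         else:
--             groups.append([l, []])
--     fixed_lines = []
--     for head, spills in groups:
--         if spills:
--             fixed_lines.append(",".join([head.strip()] + [s.strip() for s in spills]))
--         else:
--             fixed_lines.append(head)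
--     return fixed_lines
-- ===== Notes on version B (the rewrite author's own statement) =====
-- stated objective: alternative
-- what changed: Replaces the single-pass pending-line accumulator that repeatedly re-strips and string-concatenates with a two-phase version: first group each primary line with its tab-prefixed spillover lines, then render every group once with a single join of the stripped pieces.
import Mathlib
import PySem

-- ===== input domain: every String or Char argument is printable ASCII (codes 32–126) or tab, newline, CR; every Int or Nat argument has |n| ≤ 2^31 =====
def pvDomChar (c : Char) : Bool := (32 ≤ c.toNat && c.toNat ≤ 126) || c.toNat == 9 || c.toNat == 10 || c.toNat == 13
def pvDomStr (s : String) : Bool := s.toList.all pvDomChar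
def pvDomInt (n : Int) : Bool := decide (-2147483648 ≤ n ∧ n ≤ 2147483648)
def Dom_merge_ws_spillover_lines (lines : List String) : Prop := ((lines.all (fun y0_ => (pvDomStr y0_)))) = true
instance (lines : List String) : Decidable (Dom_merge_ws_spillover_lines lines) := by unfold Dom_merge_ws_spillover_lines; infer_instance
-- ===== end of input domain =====

-- B re-implements the merge as a two-phase group-then-render pass (join of stripped
-- pieces instead of repeated re-strip/concat of a pending line); return value only.


-- ===== PORT A =====
-- state = (pending_line, fixed_lines); 'if pending_line' is 'pending ≠ None' here,
-- exact under Pre_ (a pending line is then never the empty string).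
def mergeStepA (st : Option String × List String) (l : String) : Option String × List String :=
  if PySem.Str.pyGet? l 0 = some '\t' then
    match st.1 with
    | some p => (some (PySem.Str.strip p ++ "," ++ PySem.Str.strip l), st.2)
    | none => st
  else
    match st.1 with
    | some p => (some l, st.2 ++ [p])
    | none => (some l, st.2)

def merge_ws_spillover_lines (lines : List String) : List String :=
  let st := lines.foldl mergeStepA (Option.none, [])
  match st.1 with
  | some p => st.2 ++ [p]
  | none => st.2

-- ===== PORT B =====
-- groups[-1][1].append(l) guarded by 'if groups'
def addSpillB (gs : List (String × List String)) (l : String) : List (String × List String) :=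
  match gs with
  | [] => []
  | [g] => [(g.1, g.2 ++ [l])]
  | g :: rest => g :: addSpillB rest l

def stepB (gs : List (String × List String)) (l : String) : List (String × List String) :=
  if PySem.Str.startswith l "\t" then addSpillB gs l
  else gs ++ [(l, [])]

def renderGroupB (g : String × List String) : String :=
  if g.2.isEmpty then g.1
  else PySem.Str.join "," (PySem.Str.strip g.1 :: g.2.map PySem.Str.strip)

def merge_ws_spillover_lines_alt (lines : List String) : List String :=
  (lines.foldl stepB []).map renderGroupB

-- ===== PRECONDITION & SPEC =====
-- Pre_ excludes exactly the inputs on which A raises: any list containing the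
-- empty string makes l[0] raise IndexError.
def Pre_merge_ws_spillover_lines (lines : List String) : Prop := "" ∉ lines
instance (lines : List String) : Decidable (Pre_merge_ws_spillover_lines lines) := by unfold Pre_merge_ws_spillover_lines; infer_instance
def pvWitness_merge_ws_spillover_lines : List String := ["a", "\tb", "c"]

def Spec_merge_ws_spillover_lines (lines : List String) (out : List String) : Prop := out = merge_ws_spillover_lines_alt lines
instance (lines : List String) (out : List String) : Decidable (Spec_merge_ws_spillover_lines lines out) := by unfold Spec_merge_ws_spillover_lines; infer_instance

-- ===== CLAIM (what is proved, stated in full; the proofs are below) =====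
def Claim_equal_merge_ws_spillover_lines : Prop := ∀ (lines : List String), Dom_merge_ws_spillover_lines lines → Pre_merge_ws_spillover_lines lines → Spec_merge_ws_spillover_lines lines (merge_ws_spillover_lines lines)

-- ===== LEMMAS AND PROOFS =====

-- dropWhile helpers
theorem dropWhile_fixed_append {α : Type} (p : α → Bool) (a b : List α) (x : α)
    (ha : a.dropWhile p = a) (hx : p x = false) :
    (a ++ x :: b).dropWhile p = a ++ x :: b := by
  rw [List.dropWhile_append]
  cases a with
  | nil => simp [hx]
  | cons c cs =>
    simp [ha]

theorem dropWhile_fixed_prefix {α : Type} (p : α → Bool) (a b : List α)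
    (h : b.dropWhile p = b) (hab : a <+: b) : a.dropWhile p = a := by
  cases a with
  | nil => simp
  | cons c cs =>
    cases b with
    | nil => simp at hab
    | cons d ds =>
      have hcd : c = d := by
        obtain ⟨t, ht⟩ := hab
        cases ht; rfl
      rw [List.dropWhile_cons] at h ⊢
      subst hcd
      by_cases hp : p c = true
      · simp [hp] at h
        have := List.length_dropWhile_le p ds
        have hlen := congrArg List.length h
        simp at hlen
        omega
      · simp at hp
        simp [hp]

-- strip results are lstrip-/rstrip-fixed
theorem lstrip_strip (s : List Char) :
    PySem.Chars.lstrip (PySem.Chars.strip s) = PySem.Chars.strip s := by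
  unfold PySem.Chars.strip PySem.Chars.rstrip PySem.Chars.lstrip
  apply dropWhile_fixed_prefix _ _ (s.dropWhile PySem.Chars.isspace)
    (List.dropWhile_idempotent _ _)
  have hsfx : (s.dropWhile PySem.Chars.isspace).reverse.dropWhile PySem.Chars.isspace
      <:+ (s.dropWhile PySem.Chars.isspace).reverse := List.dropWhile_suffix _
  have := List.reverse_prefix.mpr hsfx
  simpa using this

theorem rstrip_strip (s : List Char) :
    PySem.Chars.rstrip (PySem.Chars.strip s) = PySem.Chars.strip s := by
  unfold PySem.Chars.strip PySem.Chars.rstrip PySem.Chars.lstrip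
  simp [List.dropWhile_idempotent]

theorem strip_strip (s : List Char) :
    PySem.Chars.strip (PySem.Chars.strip s) = PySem.Chars.strip s := by
  show PySem.Chars.rstrip (PySem.Chars.lstrip (PySem.Chars.strip s)) = _
  rw [lstrip_strip, rstrip_strip]

-- gluing around a comma keeps stripping trivial
theorem lstrip_glue (a b : List Char) (ha : PySem.Chars.lstrip a = a) :
    PySem.Chars.lstrip (a ++ ',' :: b) = a ++ ',' :: b := by
  unfold PySem.Chars.lstrip at *
  exact dropWhile_fixed_append _ _ _ _ ha (by decide)

theorem rstrip_glue (a b : List Char) (hb : PySem.Chars.rstrip b = b) :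
    PySem.Chars.rstrip (a ++ ',' :: b) = a ++ ',' :: b := by
  unfold PySem.Chars.rstrip at *
  have hb' : b.reverse.dropWhile PySem.Chars.isspace = b.reverse := by
    have := congrArg List.reverse hb
    simpa using this
  rw [show (a ++ ',' :: b).reverse = b.reverse ++ ',' :: a.reverse by simp]
  rw [dropWhile_fixed_append _ _ _ _ hb' (by decide)]
  simp

-- appending one more piece to a comma-join
theorem join_comma_append (xs : List (List Char)) (z : List Char) (hxs : xs ≠ []) :
    PySem.Chars.join [','] (xs ++ [z]) = PySem.Chars.join [','] xs ++ ',' :: z := by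
  induction xs with
  | nil => exact absurd rfl hxs
  | cons a t ih =>
    cases t with
    | nil => simp [PySem.Chars.join_cons_cons, PySem.Chars.join_singleton]
    | cons b t' =>
      simp only [List.cons_append] at ih ⊢
      rw [PySem.Chars.join_cons_cons, PySem.Chars.join_cons_cons, ih (by simp)]
      simp

-- a join of stripped pieces is strip-fixed
theorem strip_join_strips (h : List Char) (sp : List (List Char)) :
    PySem.Chars.strip (PySem.Chars.join [','] (PySem.Chars.strip h :: sp.map PySem.Chars.strip))
      = PySem.Chars.join [','] (PySem.Chars.strip h :: sp.map PySem.Chars.strip) := by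
  cases sp with
  | nil => simpa [PySem.Chars.join_singleton] using strip_strip h
  | cons s0 ss =>
    have h1 : PySem.Chars.join [','] (PySem.Chars.strip h :: (s0 :: ss).map PySem.Chars.strip)
        = PySem.Chars.strip h ++ ',' :: PySem.Chars.join [','] ((s0 :: ss).map PySem.Chars.strip) := by
      rw [List.map_cons, PySem.Chars.join_cons_cons]
      simp
    obtain ⟨zs, z, hz⟩ : ∃ zs z, s0 :: ss = zs ++ [z] := by
      rcases List.eq_nil_or_concat (s0 :: ss) with h' | ⟨zs, z, h'⟩
      · simp at h'
      · exact ⟨zs, z, by rw [h', List.concat_eq_append]⟩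
    have h2 : PySem.Chars.join [','] (PySem.Chars.strip h :: (s0 :: ss).map PySem.Chars.strip)
        = PySem.Chars.join [','] (PySem.Chars.strip h :: zs.map PySem.Chars.strip)
            ++ ',' :: PySem.Chars.strip z := by
      rw [hz, List.map_append, List.map_singleton,
        show PySem.Chars.strip h :: (zs.map PySem.Chars.strip ++ [PySem.Chars.strip z])
          = (PySem.Chars.strip h :: zs.map PySem.Chars.strip) ++ [PySem.Chars.strip z] by simp,
        join_comma_append _ _ (by simp)]
    show PySem.Chars.rstrip (PySem.Chars.lstrip _) = _
    rw [h1, lstrip_glue _ _ (lstrip_strip h), ← h1, h2,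
      rstrip_glue _ _ (rstrip_strip z), ← h2]

theorem chars_render_snoc (hh ll : List Char) (ps : List (List Char)) :
    PySem.Chars.strip (PySem.Chars.join [','] (PySem.Chars.strip hh :: ps.map PySem.Chars.strip))
        ++ ',' :: PySem.Chars.strip ll
      = PySem.Chars.join [','] (PySem.Chars.strip hh :: (ps ++ [ll]).map PySem.Chars.strip) := by
  rw [strip_join_strips, List.map_append, List.map_singleton,
    show PySem.Chars.strip hh :: (ps.map PySem.Chars.strip ++ [PySem.Chars.strip ll])
      = (PySem.Chars.strip hh :: ps.map PySem.Chars.strip) ++ [PySem.Chars.strip ll] by simp,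
    join_comma_append _ _ (by simp)]

-- abstraction from B's groups to A's state
def absSt (gs : List (String × List String)) : Option String × List String :=
  match gs.getLast? with
  | none => (none, [])
  | some g => (some (renderGroupB g), gs.dropLast.map renderGroupB)

theorem renderGroupB_nil (h : String) : renderGroupB (h, []) = h := rfl

theorem renderGroupB_cons (h s : String) (ss : List String) :
    renderGroupB (h, s :: ss)
      = PySem.Str.join "," (PySem.Str.strip h :: (s :: ss).map PySem.Str.strip) := rfl

theorem render_snoc (h l : String) (sp : List String) :
    PySem.Str.strip (renderGroupB (h, sp)) ++ "," ++ PySem.Str.strip l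
      = renderGroupB (h, sp ++ [l]) := by
  apply String.toList_inj.mp
  cases sp with
  | nil =>
    rw [renderGroupB_nil, List.nil_append, renderGroupB_cons]
    simp only [String.toList_append, PySem.Str.toList_strip, PySem.Str.toList_join,
      List.map_cons, List.map_nil]
    rw [PySem.Chars.join_cons_cons, PySem.Chars.join_singleton]
  | cons s0 ss =>
    rw [renderGroupB_cons, List.cons_append, renderGroupB_cons]
    have hcomma : (",").toList = [','] := rfl
    have hmap : ∀ (xs : List String),
        (xs.map PySem.Str.strip).map String.toList
          = (xs.map String.toList).map PySem.Chars.strip := by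
      intro xs
      simp only [List.map_map]
      exact List.map_congr_left (fun x _ => PySem.Str.toList_strip x)
    simp only [String.toList_append, PySem.Str.toList_strip, PySem.Str.toList_join,
      List.map_cons, List.map_append, List.map_nil, List.append_assoc,
      List.singleton_append, hcomma, hmap]
    have hkey := chars_render_snoc h.toList l.toList (List.map String.toList (s0 :: ss))
    simp only [List.map_cons, List.map_append, List.map_nil] at hkey
    exact hkey

theorem addSpillB_concat (init : List (String × List String)) (h : String)
    (sp : List String) (l : String) :
    addSpillB (init ++ [(h, sp)]) l = init ++ [(h, sp ++ [l])] := by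
  induction init with
  | nil => rfl
  | cons g t ih =>
    cases ht : t ++ [(h, sp)] with
    | nil => simp at ht
    | cons a as =>
      show addSpillB (g :: t ++ [(h, sp)]) l = _
      rw [List.cons_append, ht]
      show g :: addSpillB (a :: as) l = _
      rw [← ht, ih]
      simp

theorem step_commute (gs : List (String × List String)) (l : String) (hl : l ≠ "") :
    mergeStepA (absSt gs) l = absSt (stepB gs l) := by
  obtain ⟨c, cs, hcl⟩ : ∃ c cs, l.toList = c :: cs := by
    cases hc : l.toList with
    | nil => exact absurd (String.toList_inj.mp hc) hl
    | cons c cs => exact ⟨c, cs, rfl⟩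
  have hA : PySem.Str.pyGet? l 0 = some c := by simp [hcl]
  have hB : PySem.Str.startswith l "\t" = (c == '\t') := by
    rw [PySem.Str.startswith_eq, hcl]
    show PySem.Chars.startswith (c :: cs) ['\t'] = _
    simp [PySem.Chars.startswith, List.isPrefixOf, eq_comm]
  by_cases hc : c = '\t'
  · subst hc
    rw [mergeStepA, if_pos (by rw [hA]), stepB, if_pos (by rw [hB]; simp)]
    rcases List.eq_nil_or_concat gs with rfl | ⟨init, ⟨h, sp⟩, rfl⟩
    · rfl
    · rw [List.concat_eq_append, addSpillB_concat]
      simp only [absSt, List.getLast?_concat, List.dropLast_concat]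
      rw [render_snoc]
  · rw [mergeStepA, if_neg (by rw [hA]; simp [hc]), stepB,
      if_neg (by rw [hB]; simp [hc])]
    rcases List.eq_nil_or_concat gs with rfl | ⟨init, g, rfl⟩
    · simp [absSt, renderGroupB]
    · rw [List.concat_eq_append]
      simp [absSt, renderGroupB]

theorem foldl_commute (lines : List String) (gs : List (String × List String))
    (h : ∀ l ∈ lines, l ≠ "") :
    lines.foldl mergeStepA (absSt gs) = absSt (lines.foldl stepB gs) := by
  induction lines generalizing gs with
  | nil => rfl
  | cons l ls ih =>
    simp only [List.foldl_cons]
    rw [step_commute gs l (h l (by simp))]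
    exact ih _ (fun x hx => h x (by simp [hx]))

-- ===== VERDICT (by name: the statement is the Claim_ definition above) =====
theorem merge_ws_spillover_lines_spec : Claim_equal_merge_ws_spillover_lines := by
  intro lines _ hpre
  unfold Spec_merge_ws_spillover_lines merge_ws_spillover_lines merge_ws_spillover_lines_alt
  rw [show ((Option.none : Option String), ([] : List String)) = absSt [] from rfl]
  rw [foldl_commute lines [] (fun l hl => by rintro rfl; exact hpre hl)]
  generalize lines.foldl stepB [] = gs
  rcases List.eq_nil_or_concat gs with rfl | ⟨init, g, rfl⟩
  · rfl
  · rw [List.concat_eq_append]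
    simp [absSt]
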